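-- pv_equiv track=rewrite | github.com/subZiro/adventofcode_2020 | code/day_14.py | get_product_masks
-- ===== SOURCE A (Python) =====
-- from itertools import product
--
-- def get_product_masks(mask):
--     """
--     Получение возможных вариаций масок
--     """
--
--     masks = []
--
--     mask_bits = [i for i, v in enumerate(mask) if v == 'X']
--     mask_product = [''.join(x) for x in product('21', repeat=len(mask_bits))]
--
--     new_mask = mask[:]
--     for mask_prdc in mask_product:
--         bit_vals = dict(zip(mask_bits, mask_prdc))
--         for val in bit_vals:
--             new_mask = new_mask[:val] + bit_vals[val] + new_mask[val+1:]
--         masks.append(new_mask)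
--     return masks
-- ===== SOURCE B (Python) =====
-- def get_product_masks(mask):
--     """
--     Получение возможных вариаций масок
--     """
--     results = ['']
--     for c in reversed(mask):
--         if c == 'X':
--             results = [b + t for b in '21' for t in results]
--         else:
--             results = [c + t for t in results]
--     return results
-- ===== Notes on version B (the rewrite author's own statement) =====
-- stated objective: simpler
-- what changed: B grows the variant list in one reversed pass over the mask (prepending '2'/'1' at each X, copying other characters), instead of materializing itertools.product and patching a shared template string with k slice-splices per tuple.
import Mathlib
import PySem

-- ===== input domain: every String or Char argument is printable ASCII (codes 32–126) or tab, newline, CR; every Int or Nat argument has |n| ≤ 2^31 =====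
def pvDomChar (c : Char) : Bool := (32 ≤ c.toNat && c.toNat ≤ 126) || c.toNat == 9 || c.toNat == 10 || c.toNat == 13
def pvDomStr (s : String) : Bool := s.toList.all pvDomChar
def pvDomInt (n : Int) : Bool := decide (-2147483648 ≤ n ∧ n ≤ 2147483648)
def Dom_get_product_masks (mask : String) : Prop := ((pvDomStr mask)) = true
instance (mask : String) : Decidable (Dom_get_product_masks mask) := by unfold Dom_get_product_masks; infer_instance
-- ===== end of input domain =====

-- B replaces "materialize itertools.product, then patch a shared template string per tuple"
-- by one reversed pass that grows the variant list in place (prepend '2'/'1' at each X) — simpler, one pass, no per-tuple slicing.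

-- ===== PORT A =====
-- itertools.product('21', repeat=n) (rightmost coordinate varies fastest)
def prodRepA : Nat → List (List Char)
  | 0 => [[]]
  | n + 1 => ['2', '1'].flatMap (fun c => (prodRepA n).map (fun t => c :: t))

def get_product_masks (mask : String) : List String :=
  let m := mask.toList
  -- mask_bits = [i for i, v in enumerate(mask) if v == 'X']
  let mask_bits : List Int := ((PySem.List.enumerate m 0).filter (fun p => p.2 == 'X')).map (fun p => p.1)
  -- mask_product = [''.join(x) for x in product('21', repeat=len(mask_bits))]
  let mask_product : List (List Char) := prodRepA mask_bits.length
  -- new_mask = mask[:]; for mask_prdc in mask_product: … ; masks.append(new_mask)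
  let r := mask_product.foldl
    (fun (st : List Char × List (List Char)) prdc =>
      -- bit_vals = dict(zip(mask_bits, mask_prdc))
      let bit_vals := PySem.Dict.ofList (mask_bits.zip prdc)
      -- for val in bit_vals: new_mask = new_mask[:val] + bit_vals[val] + new_mask[val+1:]
      -- (iterating keys; bit_vals[val] is the value paired with the key, so we fold over items)
      let new_mask := bit_vals.items.foldl
        (fun nm kv => PySem.List.slice nm none (some kv.1) ++ [kv.2] ++ PySem.List.slice nm (some (kv.1 + 1)) none)
        st.1
      (new_mask, st.2 ++ [new_mask]))
    (m, [])
  r.2.map String.ofList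

-- ===== PORT B =====
-- results = ['']; for c in reversed(mask): double at 'X' / prepend c  — a foldr over the characters
def get_product_masks_alt (mask : String) : List String :=
  (mask.toList.foldr
    (fun c results =>
      if c == 'X' then ['2', '1'].flatMap (fun b => results.map (fun t => b :: t))
      else results.map (fun t => c :: t))
    [[]]).map String.ofList

-- ===== PRECONDITION & SPEC =====
def Spec_get_product_masks (mask : String) (out : List String) : Prop := out = get_product_masks_alt mask
instance (mask : String) (out : List String) : Decidable (Spec_get_product_masks mask out) := by unfold Spec_get_product_masks; infer_instance

-- ===== CLAIM (what is proved, stated in full; the proofs are below) =====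
def Claim_equal_get_product_masks : Prop := ∀ (mask : String), Dom_get_product_masks mask → Spec_get_product_masks mask (get_product_masks mask)

-- ===== LEMMAS AND PROOFS =====

-- B's core over char lists
def bGen (t : List Char) : List (List Char) :=
  t.foldr
    (fun c results =>
      if c == 'X' then ['2', '1'].flatMap (fun b => results.map (fun t => b :: t))
      else results.map (fun t => c :: t))
    [[]]

-- nat positions of 'X' in t, counting from s
def xpos : List Char → Nat → List Nat
  | [], _ => []
  | c :: t, s => if c = 'X' then s :: xpos t (s + 1) else xpos t (s + 1)

-- write a (position, char) list into r
def applyNat (r : List Char) (pairs : List (Nat × Char)) : List Char :=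
  pairs.foldl (fun nm kv => nm.set kv.1 kv.2) r

theorem xpos_mem {t : List Char} {s j : Nat} (h : j ∈ xpos t s) : s ≤ j ∧ j < s + t.length := by
  induction t generalizing s with
  | nil => simp [xpos] at h
  | cons c t ih =>
    simp only [xpos] at h
    split at h
    · rcases List.mem_cons.1 h with rfl | h'
      · simp
      · have := ih h'; simp only [List.length_cons]; omega
    · have := ih h; simp only [List.length_cons]; omega

theorem xpos_nodup (t : List Char) (s : Nat) : (xpos t s).Nodup := by
  induction t generalizing s with
  | nil => simp [xpos]
  | cons c t ih =>
    simp only [xpos]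
    split
    · exact List.nodup_cons.2 ⟨fun h => by have := (xpos_mem h).1; omega, ih (s + 1)⟩
    · exact ih (s + 1)

-- enumerate/filter/map of port A = Int casts of xpos
theorem mask_bits_eq (t : List Char) (s : Nat) :
    ((PySem.List.enumerate t (s : Int)).filter (fun p => p.2 == 'X')).map (fun p => p.1)
      = (xpos t s).map Int.ofNat := by
  induction t generalizing s with
  | nil => simp [PySem.List.enumerate_nil, xpos]
  | cons c t ih =>
    rw [PySem.List.enumerate_cons, List.filter_cons]
    have h1 : ((s : Int) + 1) = ((s + 1 : Nat) : Int) := by push_cast; ring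
    rw [h1]
    by_cases hc : c = 'X'
    · subst hc
      rw [if_pos (by simp), List.map_cons, ih (s + 1)]
      simp [xpos]
    · rw [if_neg (by simp [hc]), ih (s + 1)]
      simp [xpos, hc]

-- one inner iteration of port A = List.set
theorem slice_set (nm : List Char) (j : Nat) (c : Char) (h : j < nm.length) :
    PySem.List.slice nm none (some (j : Int)) ++ [c] ++ PySem.List.slice nm (some ((j : Int) + 1)) none
      = nm.set j c := by
  have h1 : ((j : Int) + 1) = ((j + 1 : Nat) : Int) := by push_cast; ring
  rw [PySem.List.slice_to_natCast, h1, PySem.List.slice_from_natCast,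
    List.set_eq_take_cons_drop c h]
  simp

-- independence of the threaded template: writing all listed positions erases the history
theorem items_ofList_nodup {κ ν : Type} [BEq κ] [LawfulBEq κ] (l : List (κ × ν))
    (h : (l.map Prod.fst).Nodup) : (PySem.Dict.ofList l).items = l := by
  have := PySem.Dict.items_foldl_insert_fresh l Prod.fst Prod.snd PySem.Dict.empty
    (by intro a _; rfl) h
  simpa [PySem.Dict.ofList, PySem.Dict.update] using this

theorem prodRepA_length {n : Nat} {tup : List Char} (h : tup ∈ prodRepA n) : tup.length = n := by
  induction n generalizing tup with
  | zero =>
    simp only [prodRepA, List.mem_singleton] at h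
    simp [h]
  | succ n ih =>
    simp only [prodRepA, List.mem_flatMap, List.mem_map] at h
    obtain ⟨c, -, t, ht, rfl⟩ := h
    simp [ih ht]

theorem foldl_slice_eq_applyNat (pairs : List (Nat × Char)) (r : List Char)
    (hb : ∀ kv ∈ pairs, kv.1 < r.length) :
    pairs.foldl (fun nm kv =>
        PySem.List.slice nm none (some (kv.1 : Int)) ++ [kv.2] ++
          PySem.List.slice nm (some ((kv.1 : Int) + 1)) none) r
      = applyNat r pairs := by
  induction pairs generalizing r with
  | nil => rfl
  | cons kv rest ih =>
    have hk := hb kv List.mem_cons_self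
    simp only [applyNat, List.foldl_cons] at *
    rw [slice_set _ _ _ hk]
    exact ih (r.set kv.1 kv.2)
      (fun kv' h' => by rw [List.length_set]; exact hb kv' (List.mem_cons_of_mem _ h'))

theorem take_succ_set (r : List Char) (s : Nat) (b : Char) (h : s < r.length) :
    (r.set s b).take (s + 1) = r.take s ++ [b] := by
  rw [List.set_eq_take_cons_drop b h, List.take_append]
  have h1 : (r.take s).length = s := by rw [List.length_take]; omega
  rw [List.take_of_length_le (by omega), h1]
  simp

theorem applyNat_indep (pairs : List (Nat × Char)) (r m : List Char)
    (hlen : r.length = m.length)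
    (hb : ∀ k ∈ pairs.map (fun kv => kv.1), k < m.length)
    (hag : ∀ j, j ∉ pairs.map (fun kv => kv.1) → r[j]? = m[j]?) :
    applyNat r pairs = applyNat m pairs := by
  induction pairs generalizing r m with
  | nil =>
    exact List.ext_getElem? (fun j => hag j (by simp))
  | cons kv rest ih =>
    have hk : kv.1 < m.length := hb kv.1 (by simp)
    simp only [applyNat, List.foldl_cons] at *
    apply ih
    · rw [List.length_set, List.length_set, hlen]
    · intro k hkmem; rw [List.length_set]; exact hb k (by simp [hkmem])
    · intro j hj
      by_cases hjk : j = kv.1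
      · subst hjk
        rw [List.getElem?_set_eq_of_lt _ (by omega), List.getElem?_set_eq_of_lt _ hk]
      · rw [List.getElem?_set_ne (fun h => hjk h.symm), List.getElem?_set_ne (fun h => hjk h.symm)]
        exact hag j (by simp only [List.map_cons, List.mem_cons]; exact fun h => h.elim hjk hj)

theorem applyNat_agree (pairs : List (Nat × Char)) (bits : List Nat) (r m : List Char)
    (hlen : r.length = m.length)
    (hb : ∀ k ∈ pairs.map (fun kv => kv.1), k < m.length)
    (hsub : ∀ k ∈ pairs.map (fun kv => kv.1), k ∈ bits) :
    (applyNat r pairs).length = m.length ∧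
      ∀ j, j ∉ bits → r[j]? = m[j]? → (applyNat r pairs)[j]? = m[j]? := by
  induction pairs generalizing r with
  | nil => exact ⟨hlen, fun _ _ h => h⟩
  | cons kv rest ih =>
    have hk : kv.1 < m.length := hb kv.1 (by simp)
    simp only [applyNat, List.foldl_cons] at *
    refine ih (r.set kv.1 kv.2) (by rw [List.length_set, hlen])
      (fun k hk' => hb k (by simp only [List.map_cons, List.mem_cons]; exact Or.inr hk'))
      (fun k hk' => hsub k (by simp only [List.map_cons, List.mem_cons]; exact Or.inr hk'))
      |>.imp id (fun h2 j hj hag => h2 j hj ?_)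
    have hjk : j ≠ kv.1 := fun he => hj (he ▸ hsub kv.1 (by simp))
    rw [List.getElem?_set_ne (fun h => hjk h.symm)]
    exact hag

-- the product-of-tuples view equals B's incremental view
theorem prod_map_eq_bGen (t : List Char) (s : Nat) (r : List Char)
    (hlen : r.length = s + t.length) (hdrop : r.drop s = t) :
    (prodRepA (xpos t s).length).map (fun tup => applyNat r ((xpos t s).zip tup))
      = (bGen t).map (fun g => r.take s ++ g) := by
  induction t generalizing s r with
  | nil =>
    have hr : r.take s = r := List.take_of_length_le (by simp only [List.length_nil] at hlen; omega)
    simp [xpos, prodRepA, applyNat, bGen, hr]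
  | cons c t ih =>
    have hs : s < r.length := by simp only [List.length_cons] at hlen; omega
    have hgs : r[s]? = some c := by
      have h0 : (r.drop s)[0]? = some c := by rw [hdrop]; rfl
      rw [List.getElem?_drop] at h0; simpa using h0
    have hdrop1 : r.drop (s + 1) = t := by
      have h1 : (r.drop s).tail = t := by rw [hdrop]; rfl
      rwa [List.tail_drop] at h1
    by_cases hc : c = 'X'
    · subst hc
      have hx : xpos ('X' :: t) s = s :: xpos t (s + 1) := by simp [xpos]
      have hbg : bGen ('X' :: t)
          = ['2', '1'].flatMap (fun b => (bGen t).map (fun g => b :: g)) := by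
        simp [bGen]
      rw [hx, hbg]
      have step : ∀ b tup, applyNat r ((s :: xpos t (s + 1)).zip (b :: tup))
          = applyNat (r.set s b) ((xpos t (s + 1)).zip tup) := by
        intro b tup; rfl
      have ihb : ∀ b : Char,
          (prodRepA (xpos t (s + 1)).length).map
              (fun tup => applyNat (r.set s b) ((xpos t (s + 1)).zip tup))
            = (bGen t).map (fun g => (r.take s ++ [b]) ++ g) := by
        intro b
        rw [ih (s + 1) (r.set s b)
          (by rw [List.length_set]; simp only [List.length_cons] at hlen; omega)
          (by rw [List.drop_set_of_lt (by omega : s < s + 1), hdrop1])]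
        rw [take_succ_set r s b hs]
      simp only [List.length_cons, prodRepA, List.flatMap_cons, List.flatMap_nil,
        List.append_nil, List.map_append, List.map_map]
      have e2 := ihb '2'
      have e1 := ihb '1'
      rw [show ((fun tup => applyNat r ((s :: xpos t (s + 1)).zip tup)) ∘ fun t => '2' :: t)
            = (fun tup => applyNat (r.set s '2') ((xpos t (s + 1)).zip tup)) from rfl,
          show ((fun tup => applyNat r ((s :: xpos t (s + 1)).zip tup)) ∘ fun t => '1' :: t)
            = (fun tup => applyNat (r.set s '1') ((xpos t (s + 1)).zip tup)) from rfl]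
      rw [e2, e1]
      simp [Function.comp_def, List.append_assoc]
    · have hx : xpos (c :: t) s = xpos t (s + 1) := by simp [xpos, hc]
      have hbg : bGen (c :: t) = (bGen t).map (fun g => c :: g) := by
        simp [bGen, hc]
      rw [hx, hbg]
      rw [ih (s + 1) r (by simp only [List.length_cons] at hlen; omega) hdrop1]
      have htake : r.take (s + 1) = r.take s ++ [c] := by
        rw [List.take_add_one, hgs]; rfl
      simp [htake, List.map_map, Function.comp_def, List.append_assoc]

-- let-free views of port A's loop bodies (definitionally equal to the port's lambdas)
def sliceStep (nm : List Char) (kv : Int × Char) : List Char :=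
  PySem.List.slice nm none (some kv.1) ++ [kv.2] ++ PySem.List.slice nm (some (kv.1 + 1)) none

def stepA (B : List Int) (st : List Char × List (List Char)) (prdc : List Char) :
    List Char × List (List Char) :=
  ((PySem.Dict.ofList (B.zip prdc)).items.foldl sliceStep st.1,
   st.2 ++ [(PySem.Dict.ofList (B.zip prdc)).items.foldl sliceStep st.1])

-- port A's outer loop, with mask_bits already rewritten to (xpos m 0).map Int.ofNat:
-- the threaded template r never matters, each tuple writes every X position
theorem foldA_general (m : List Char) (tuples : List (List Char))
    (hT : ∀ tup ∈ tuples, tup.length = (xpos m 0).length) (r : List Char)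
    (acc : List (List Char))
    (hlen : r.length = m.length) (hag : ∀ j, j ∉ xpos m 0 → r[j]? = m[j]?) :
    (tuples.foldl (stepA ((xpos m 0).map Int.ofNat)) (r, acc)).2
      = acc ++ tuples.map (fun tup => applyNat m ((xpos m 0).zip tup)) := by
  induction tuples generalizing r acc with
  | nil => simp
  | cons tup rest ih =>
    have hTl : tup.length = (xpos m 0).length := hT tup List.mem_cons_self
    have hfst : ((xpos m 0).zip tup).map Prod.fst = xpos m 0 :=
      List.map_fst_zip (le_of_eq hTl.symm)
    have hzip : (((xpos m 0).map Int.ofNat).zip tup)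
        = ((xpos m 0).zip tup).map (fun kv => (Int.ofNat kv.1, kv.2)) := by
      rw [List.zip_map_left]
      exact List.map_congr_left (fun kv _ => rfl)
    have hmm : ((((xpos m 0).zip tup).map (fun kv => (Int.ofNat kv.1, kv.2))).map Prod.fst)
        = (xpos m 0).map Int.ofNat := by
      rw [List.map_map,
        show (Prod.fst ∘ fun kv : Nat × Char => (Int.ofNat kv.1, kv.2))
          = (Int.ofNat ∘ Prod.fst) from rfl,
        ← List.map_map, hfst]
    have hnodup : (((((xpos m 0).zip tup).map (fun kv => (Int.ofNat kv.1, kv.2)))).map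
        Prod.fst).Nodup := by
      rw [hmm]
      exact (xpos_nodup m 0).map (fun a b h => Int.ofNat.inj h)
    have hkeysr : ∀ kv ∈ (xpos m 0).zip tup, kv.1 < r.length := by
      intro kv hkv
      have h1 : kv.1 ∈ xpos m 0 := (List.of_mem_zip hkv).1
      have := xpos_mem h1; omega
    have hnew : ((PySem.Dict.ofList ((((xpos m 0).map Int.ofNat)).zip tup)).items.foldl
          sliceStep r) = applyNat r ((xpos m 0).zip tup) := by
      rw [hzip, items_ofList_nodup _ hnodup, List.foldl_map]
      exact foldl_slice_eq_applyNat _ _ hkeysr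
    have hkeysm : ∀ k ∈ ((xpos m 0).zip tup).map (fun kv => kv.1), k < m.length := by
      intro k hk
      simp only [List.mem_map] at hk
      obtain ⟨kv, hkv, rfl⟩ := hk
      have := xpos_mem ((List.of_mem_zip hkv).1); omega
    have hfst' : ((xpos m 0).zip tup).map (fun kv => kv.1) = xpos m 0 := hfst
    have hindep : applyNat r ((xpos m 0).zip tup) = applyNat m ((xpos m 0).zip tup) := by
      apply applyNat_indep _ _ _ hlen hkeysm
      intro j hj
      exact hag j (by rwa [hfst'] at hj)
    have hinv := applyNat_agree ((xpos m 0).zip tup) (xpos m 0) r m hlen hkeysm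
      (by intro k hk; rwa [hfst'] at hk)
    rw [List.foldl_cons]
    simp only [stepA, hnew]
    rw [ih (fun t ht => hT t (List.mem_cons_of_mem _ ht)) _ _ hinv.1
      (fun j hj => hinv.2 j hj (hag j hj))]
    rw [hindep]
    simp

-- ===== VERDICT (by name: the statement is the Claim_ definition above) =====
theorem get_product_masks_spec : Claim_equal_get_product_masks := by
  intro mask _
  unfold Spec_get_product_masks
  have hA : get_product_masks mask
      = ((prodRepA (((PySem.List.enumerate mask.toList 0).filter
            (fun p => p.2 == 'X')).map (fun p => p.1)).length).foldl
          (stepA (((PySem.List.enumerate mask.toList 0).filter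
            (fun p => p.2 == 'X')).map (fun p => p.1)))
          (mask.toList, [])).2.map String.ofList := rfl
  have hB : get_product_masks_alt mask = (bGen mask.toList).map String.ofList := rfl
  have hbits : ((PySem.List.enumerate mask.toList (0 : Int)).filter
        (fun p => p.2 == 'X')).map (fun p => p.1)
      = (xpos mask.toList 0).map Int.ofNat := by
    have := mask_bits_eq mask.toList 0
    simpa using this
  rw [hA, hB, hbits, List.length_map]
  rw [foldA_general mask.toList (prodRepA (xpos mask.toList 0).length)
    (fun tup ht => prodRepA_length ht) mask.toList [] rfl (fun _ _ => rfl)]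
  rw [prod_map_eq_bGen mask.toList 0 mask.toList (by simp) (by simp)]
  simp
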